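-- pv_equiv track=rewrite | github.com/schaffrx/Date_Parser | month_parse.py | set_years
-- ===== SOURCE A (Python) =====
-- def set_years(day_month: list, year_index: int) -> list:
--     """ Concatenate and increment the year to the day_month string
--
--     Parameters
--     ----------
--     day_month : list
--         The list generated by the get_day_month function
--     year_index : int
--         The starting year for the dates
--
--     Returns
--     -------
--     list
--         a list of all properly formatted year_day_month strings
--     """
--     year = year_index
--     year_day_month: list = []
--     incremented_year: bool = False
--     for month in day_month:
--         if "Jan" in month and not incremented_year:
--             incremented_year = True
--             year += 1
--             year_day_month.append(str(year) + "-" + month)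
--         else:
--             #incremented_year = False
--             year_day_month.append(str(year) + "-" + month)
--     return(year_day_month)
-- ===== SOURCE B (Python) =====
-- def set_years(day_month: list, year_index: int) -> list:
--     first_jan = next((i for i, m in enumerate(day_month) if "Jan" in m), len(day_month))
--     return ([str(year_index) + "-" + m for m in day_month[:first_jan]]
--             + [str(year_index + 1) + "-" + m for m in day_month[first_jan:]])
-- ===== Notes on version B (the rewrite author's own statement) =====
-- stated objective: simpler
-- what changed: Replaces the stateful boolean-flag loop with computing the first 'Jan' index up front and concatenating two mapped slices (before: year_index, from there on: year_index+1).
import Mathlib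
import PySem

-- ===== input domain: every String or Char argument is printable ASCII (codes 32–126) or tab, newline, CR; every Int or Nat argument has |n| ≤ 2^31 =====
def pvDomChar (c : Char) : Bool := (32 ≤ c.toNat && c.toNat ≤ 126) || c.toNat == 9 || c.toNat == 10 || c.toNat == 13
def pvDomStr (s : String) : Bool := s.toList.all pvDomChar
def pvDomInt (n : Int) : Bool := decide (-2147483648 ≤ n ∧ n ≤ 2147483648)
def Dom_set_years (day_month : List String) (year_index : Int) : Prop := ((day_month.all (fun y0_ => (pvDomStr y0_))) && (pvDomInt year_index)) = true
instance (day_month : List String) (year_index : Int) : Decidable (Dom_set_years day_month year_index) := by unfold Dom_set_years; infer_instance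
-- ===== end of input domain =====

-- B computes the first-'Jan' split index and maps two slices instead of A's boolean-flag stateful loop; same output.


-- ===== PORT A =====
def setYearsLoop (months : List String) (year : Int) (yearDayMonth : List String) (incrementedYear : Bool) : List String :=
  match months with
  | [] => yearDayMonth
  | month :: rest =>
    if PySem.Str.isIn "Jan" month && !incrementedYear then
      setYearsLoop rest (year + 1) (yearDayMonth ++ [PySem.Int.toStr (year + 1) ++ "-" ++ month]) true
    else
      setYearsLoop rest year (yearDayMonth ++ [PySem.Int.toStr year ++ "-" ++ month]) incrementedYear

def set_years (day_month : List String) (year_index : Int) : List String :=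
  setYearsLoop day_month year_index [] false

-- ===== PORT B =====
-- first index i with "Jan" in day_month[i], falling back to len(day_month) (the next(...) call)
def firstJanIdx : List String → Nat
  | [] => 0
  | m :: rest => if PySem.Str.isIn "Jan" m then 0 else 1 + firstJanIdx rest

def set_years_alt (day_month : List String) (year_index : Int) : List String :=
  let firstJan := firstJanIdx day_month
  (day_month.take firstJan).map (fun m => PySem.Int.toStr year_index ++ "-" ++ m)
    ++ (day_month.drop firstJan).map (fun m => PySem.Int.toStr (year_index + 1) ++ "-" ++ m)

-- ===== PRECONDITION & SPEC =====
def Spec_set_years (day_month : List String) (year_index : Int) (out : List String) : Prop := out = set_years_alt day_month year_index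
instance (day_month : List String) (year_index : Int) (out : List String) : Decidable (Spec_set_years day_month year_index out) := by unfold Spec_set_years; infer_instance

-- ===== CLAIM (what is proved, stated in full; the proofs are below) =====
def Claim_equal_set_years : Prop := ∀ (day_month : List String) (year_index : Int), Dom_set_years day_month year_index → Spec_set_years day_month year_index (set_years day_month year_index)

-- ===== LEMMAS AND PROOFS =====

lemma setYearsLoop_true (ms : List String) (y : Int) (acc : List String) :
    setYearsLoop ms y acc true = acc ++ ms.map (fun m => PySem.Int.toStr y ++ "-" ++ m) := by
  induction ms generalizing acc with
  | nil => simp [setYearsLoop]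
  | cons m rest ih => simp [setYearsLoop, ih]

lemma setYearsLoop_false (ms : List String) (y : Int) (acc : List String) :
    setYearsLoop ms y acc false = acc ++ set_years_alt ms y := by
  induction ms generalizing y acc with
  | nil => simp [setYearsLoop, set_years_alt, firstJanIdx]
  | cons m rest ih =>
    by_cases h : PySem.Chars.isIn ['J', 'a', 'n'] m.toList = true
    · simp [setYearsLoop, h, set_years_alt, firstJanIdx, setYearsLoop_true]
    · simp [setYearsLoop, h, set_years_alt, firstJanIdx, ih, Nat.one_add, List.take_succ_cons, List.drop_succ_cons]

-- ===== VERDICT (by name: the statement is the Claim_ definition above) =====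
theorem set_years_spec : Claim_equal_set_years := by
  intro dm yi _
  unfold Spec_set_years set_years
  simpa using setYearsLoop_false dm yi []
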